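-- pv_equiv track=rewrite | github.com/OWalker02/Top-Drives | src/scraping/scraper.py | _split_into_groups
-- ===== SOURCE A (Python) =====
-- from typing import Dict, List, Tuple
--
-- def _split_into_groups(car_count: int) -> List[Tuple[int, int]]:
--     """
--     Splits car_count into groups of 7, using 8 where needed to avoid remainders.
--     Falls back to variable-size final group if unsolvable.
--     """
--     groups = []
--     if car_count % 7 == 0:
--         for i in range(0, car_count, 7):
--             groups.append((i, i + 7))
--     else:
--         solved = False
--         max_eights = car_count // 8  # Check the max number of groups size 8
--         # Check all combos of groups of size 7 and 8
--         for num_add_one in range(1, max_eights + 1):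
--             # If using this combo works, make it
--             if (car_count - num_add_one * 8) % 7 == 0:
--                 for i in range(0, car_count - num_add_one * 8, 7):
--                     groups.append((i, i + 7))
--                 for j in range(car_count - num_add_one * 8, car_count, 8):
--                     groups.append((j, j + 8))
--                 solved = True
--                 break
--         if not solved:
--             for i in range(0, car_count, 7):
--                 groups.append((i, min(i + 7, car_count)))
--     return groups
-- ===== SOURCE B (Python) =====
-- from typing import Dict, List, Tuple
--
-- def _split_into_groups(car_count: int) -> List[Tuple[int, int]]:
--     """
--     Closed-form split: car_count % 7 is exactly the number of size-8 groups
--     needed (8 = 7 + 1), feasible iff it does not exceed car_count // 8.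
--     """
--     r = car_count % 7
--     if r == 0:
--         return [(i, i + 7) for i in range(0, car_count, 7)]
--     if r <= car_count // 8:
--         cut = car_count - r * 8
--         return ([(i, i + 7) for i in range(0, cut, 7)]
--                 + [(j, j + 8) for j in range(cut, car_count, 8)])
--     return [(i, min(i + 7, car_count)) for i in range(0, car_count, 7)]
-- ===== Notes on version B (the rewrite author's own statement) =====
-- stated objective: simpler
-- what changed: Replaces A's linear search over all candidate counts of size-8 groups with the closed-form observation that the needed count is exactly car_count % 7 (since 8 = 7 + 1), feasible iff it does not exceed car_count // 8, so B is a three-branch formula with no search loop.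
import Mathlib
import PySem

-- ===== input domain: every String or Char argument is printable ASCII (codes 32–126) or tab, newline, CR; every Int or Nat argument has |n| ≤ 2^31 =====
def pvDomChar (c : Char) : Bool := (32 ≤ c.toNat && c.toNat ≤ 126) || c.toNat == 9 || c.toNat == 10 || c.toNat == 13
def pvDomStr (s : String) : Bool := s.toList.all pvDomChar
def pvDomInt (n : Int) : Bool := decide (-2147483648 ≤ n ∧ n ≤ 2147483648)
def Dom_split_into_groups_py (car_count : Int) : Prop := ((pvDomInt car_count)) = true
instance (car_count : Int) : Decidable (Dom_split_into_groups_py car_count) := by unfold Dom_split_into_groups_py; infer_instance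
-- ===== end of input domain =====

-- B replaces A's search for the number of size-8 groups by the closed form car_count % 7 (simpler; same return value).

-- ===== PORT A =====
-- A's search loop with break: first num_add_one in the candidate list whose combo works, else none.
def pvSearchA (c : Int) : List Int → Option (List (Int × Int))
  | [] => none
  | k :: ks =>
    if PySem.Int.mod (c - k * 8) 7 == 0 then
      some ((PySem.List.pyRange (c - k * 8) c 8).foldl (fun g j => g ++ [(j, j + 8)])
            ((PySem.List.pyRange 0 (c - k * 8) 7).foldl (fun g i => g ++ [(i, i + 7)]) []))
    else pvSearchA c ks

def split_into_groups_py (car_count : Int) : List (Int × Int) :=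
  if PySem.Int.mod car_count 7 == 0 then
    (PySem.List.pyRange 0 car_count 7).foldl (fun g i => g ++ [(i, i + 7)]) []
  else
    let maxEights := PySem.Int.floordiv car_count 8
    match pvSearchA car_count (PySem.List.pyRange 1 (maxEights + 1) 1) with
    | some g => g
    | none =>
      (PySem.List.pyRange 0 car_count 7).foldl (fun g i => g ++ [(i, min (i + 7) car_count)]) []

-- ===== PORT B =====
def split_into_groups_py_alt (car_count : Int) : List (Int × Int) :=
  let r := PySem.Int.mod car_count 7
  if r == 0 then
    (PySem.List.pyRange 0 car_count 7).map (fun i => (i, i + 7))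
  else if r ≤ PySem.Int.floordiv car_count 8 then
    let cut := car_count - r * 8
    (PySem.List.pyRange 0 cut 7).map (fun i => (i, i + 7))
      ++ (PySem.List.pyRange cut car_count 8).map (fun j => (j, j + 8))
  else
    (PySem.List.pyRange 0 car_count 7).map (fun i => (i, min (i + 7) car_count))

-- ===== PRECONDITION & SPEC =====
def Spec_split_into_groups_py (car_count : Int) (out : List (Int × Int)) : Prop := out = split_into_groups_py_alt car_count
instance (car_count : Int) (out : List (Int × Int)) : Decidable (Spec_split_into_groups_py car_count out) := by unfold Spec_split_into_groups_py; infer_instance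

-- ===== CLAIM (what is proved, stated in full; the proofs are below) =====
def Claim_equal_split_into_groups_py : Prop := ∀ (car_count : Int), Dom_split_into_groups_py car_count → Spec_split_into_groups_py car_count (split_into_groups_py car_count)

-- ===== LEMMAS AND PROOFS =====

-- append-folds build the map of the list
theorem pv_foldl_append_map (f : Int → Int × Int) (l : List Int) (init : List (Int × Int)) :
    l.foldl (fun g i => g ++ [f i]) init = init ++ l.map f := by
  induction l generalizing init with
  | nil => simp
  | cons x xs ih => simp [List.foldl, ih]

-- A's search over [a, b) finds exactly k = c % 7 (since 8 ≡ 1 mod 7) when it is below b, else nothing.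
theorem pv_search_eval (c r : Int) (hr : r = PySem.Int.mod c 7) (h1 : 1 ≤ r) :
    ∀ (n : Nat) (a b : Int), (b - a).toNat = n → 1 ≤ a → a ≤ r →
    pvSearchA c (PySem.List.pyRange a b 1) =
      if r < b then
        some ((PySem.List.pyRange (c - r * 8) c 8).foldl (fun g j => g ++ [(j, j + 8)])
              ((PySem.List.pyRange 0 (c - r * 8) 7).foldl (fun g i => g ++ [(i, i + 7)]) []))
      else none := by
  have hmod : PySem.Int.mod c 7 = c % 7 := PySem.Int.mod_eq_emod_of_pos (by norm_num)
  have hrc : r = c % 7 := by rw [hr, hmod]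
  have hrb : r ≤ 6 := by
    have := Int.emod_lt_of_pos c (b := 7) (by norm_num); omega
  intro n
  induction n with
  | zero =>
    intro a b hn ha har
    have hba : b ≤ a := by omega
    rw [PySem.List.pyRange_one_eq_nil hba]
    have hnb : ¬ r < b := by omega
    rw [if_neg hnb]; rfl
  | succ m ih =>
    intro a b hn ha har
    have hab : a < b := by omega
    rw [PySem.List.pyRange_one_cons hab]
    by_cases hk : a = r
    · have hworks : PySem.Int.mod (c - a * 8) 7 = 0 := by
        rw [PySem.Int.mod_eq_emod_of_pos (by norm_num)]; omega
      have hlt : r < b := by omega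
      rw [if_pos hlt]
      show (if (PySem.Int.mod (c - a * 8) 7 == 0) = true then _ else _) = _
      rw [if_pos (by rw [hworks]; rfl), hk]
    · have halt : a < r := by omega
      have hfail : ¬ PySem.Int.mod (c - a * 8) 7 = 0 := by
        rw [PySem.Int.mod_eq_emod_of_pos (by norm_num)]; omega
      show (if (PySem.Int.mod (c - a * 8) 7 == 0) = true then _ else _) = _
      rw [if_neg (by simpa using hfail)]
      exact ih (a + 1) b (by omega) (by omega) (by omega)

-- ===== VERDICT (by name: the statement is the Claim_ definition above) =====
theorem split_into_groups_py_spec : Claim_equal_split_into_groups_py := by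
  intro c _
  unfold Spec_split_into_groups_py split_into_groups_py split_into_groups_py_alt
  have hmod : PySem.Int.mod c 7 = c % 7 := PySem.Int.mod_eq_emod_of_pos (by norm_num)
  by_cases h0 : PySem.Int.mod c 7 = 0
  · rw [if_pos (by rw [h0]; rfl)]
    show _ = (if (PySem.Int.mod c 7 == 0) = true then _ else _)
    rw [if_pos (by rw [h0]; rfl), pv_foldl_append_map]
    rfl
  · have h0b : (PySem.Int.mod c 7 == 0) = false := by simpa using h0
    have hr1 : (1 : Int) ≤ PySem.Int.mod c 7 := by
      have h1 := Int.emod_nonneg c (show (7:Int) ≠ 0 by norm_num)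
      omega
    have hsearch := pv_search_eval c (PySem.Int.mod c 7) rfl hr1
      (PySem.Int.floordiv c 8 + 1 - 1).toNat 1 (PySem.Int.floordiv c 8 + 1) rfl le_rfl hr1
    rw [if_neg (by simp only [beq_iff_eq]; exact h0)]
    show (match pvSearchA c (PySem.List.pyRange 1 (PySem.Int.floordiv c 8 + 1) 1) with
          | some g => g
          | none => (PySem.List.pyRange 0 c 7).foldl (fun g i => g ++ [(i, min (i + 7) c)]) []) =
      (if (PySem.Int.mod c 7 == 0) = true then _ else _)
    rw [if_neg (by simp only [beq_iff_eq]; exact h0), hsearch]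
    by_cases hle : PySem.Int.mod c 7 ≤ PySem.Int.floordiv c 8
    · rw [if_pos (by omega), if_pos hle, pv_foldl_append_map, pv_foldl_append_map]
      rfl
    · rw [if_neg (by omega), if_neg hle, pv_foldl_append_map]
      rfl
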